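-- pv_equiv track=rewrite | github.com/1j01/textual-paint | src/textual_paint/paint.py | bresenham_walk
-- ===== SOURCE A (Python) =====
-- from typing import Any, Coroutine, NamedTuple, Optional, Callable, Iterator
--
-- def bresenham_walk(x0: int, y0: int, x1: int, y1: int) -> Iterator[tuple[int, int]]:
--     """Bresenham's line algorithm"""
--     dx = abs(x1 - x0)
--     dy = abs(y1 - y0)
--     sx = 1 if x0 < x1 else -1
--     sy = 1 if y0 < y1 else -1
--     err = dx - dy
--     while True:
--         yield x0, y0
--         if x0 == x1 and y0 == y1:
--             break
--         e2 = 2 * err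
--         if e2 > -dy:
--             err = err - dy
--             x0 = x0 + sx
--         if e2 < dx:
--             err = err + dx
--             y0 = y0 + sy
-- ===== SOURCE B (Python) =====
-- def bresenham_walk(x0, y0, x1, y1):
--     """Bresenham's line algorithm, split into the two major-axis cases."""
--     dx = abs(x1 - x0)
--     dy = abs(y1 - y0)
--     sx = 1 if x0 < x1 else -1
--     sy = 1 if y0 < y1 else -1
--     if dx >= dy:
--         t = dx - 2 * dy
--         x, y = x0, y0
--         for _ in range(dx + 1):
--             yield x, y
--             if t < 0:
--                 t += 2 * dx
--                 y += sy
--             t -= 2 * dy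
--             x += sx
--     else:
--         u = 2 * dx - dy
--         x, y = x0, y0
--         for _ in range(dy + 1):
--             yield x, y
--             if u > 0:
--                 u -= 2 * dy
--                 x += sx
--             u += 2 * dx
--             y += sy
-- ===== Notes on version B (the rewrite author's own statement) =====
-- stated objective: idiomatic
-- what changed: Replaced the single all-octant error loop (err = dx-dy, two independent if-steps per iteration, terminating on reaching the endpoint) by the classic two-case major-axis Bresenham: branch on dx >= dy, then a bounded count loop of exactly max(dx,dy)+1 iterations advancing the major axis every step and the minor axis when the error term crosses zero.
import Mathlib
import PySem

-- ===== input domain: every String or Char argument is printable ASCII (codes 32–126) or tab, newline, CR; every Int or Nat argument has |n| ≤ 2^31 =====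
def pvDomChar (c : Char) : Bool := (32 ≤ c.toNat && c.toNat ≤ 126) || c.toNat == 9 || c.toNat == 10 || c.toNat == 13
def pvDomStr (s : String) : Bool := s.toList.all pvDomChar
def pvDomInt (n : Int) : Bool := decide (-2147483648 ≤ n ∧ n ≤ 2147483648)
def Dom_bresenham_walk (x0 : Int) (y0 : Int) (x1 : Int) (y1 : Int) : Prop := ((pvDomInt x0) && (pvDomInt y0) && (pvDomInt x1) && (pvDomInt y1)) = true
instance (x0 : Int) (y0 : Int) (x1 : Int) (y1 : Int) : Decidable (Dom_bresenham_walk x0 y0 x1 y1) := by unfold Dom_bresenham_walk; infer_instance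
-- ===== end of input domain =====

-- B rewrites the all-octant single-error Bresenham loop as the classic two-case
-- major-axis form (x-dominant / y-dominant, each a bounded count loop); same cost,
-- more idiomatic decomposition. Equal output proved for all integer inputs.

-- ===== PORT A =====
-- Python's `while True` loop, made total with fuel; fuel (dx+dy)+1 is enough,
-- proved by the equivalence below (the loop runs max(dx,dy)+1 iterations).
def bwLoop (fuel : Nat) (x0 y0 x1 y1 sx sy dx dy err : Int) : List (Int × Int) :=
  match fuel with
  | 0 => []
  | fuel + 1 =>
    (x0, y0) ::
      (if x0 = x1 ∧ y0 = y1 then []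
       else
         let e2 := 2 * err
         let err1 := if e2 > -dy then err - dy else err
         let x0' := if e2 > -dy then x0 + sx else x0
         let err2 := if e2 < dx then err1 + dx else err1
         let y0' := if e2 < dx then y0 + sy else y0
         bwLoop fuel x0' y0' x1 y1 sx sy dx dy err2)

def bresenham_walk (x0 : Int) (y0 : Int) (x1 : Int) (y1 : Int) : List (Int × Int) :=
  let dx := |x1 - x0|
  let dy := |y1 - y0|
  let sx : Int := if x0 < x1 then 1 else -1
  let sy : Int := if y0 < y1 then 1 else -1
  bwLoop ((dx + dy).toNat + 1) x0 y0 x1 y1 sx sy dx dy (dx - dy)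

-- ===== PORT B =====
-- x-dominant loop of Source B: runs n times, error term t
def bwAltX (n : Nat) (x y sx sy dx dy t : Int) : List (Int × Int) :=
  match n with
  | 0 => []
  | n + 1 =>
    (x, y) ::
      (if t < 0 then bwAltX n (x + sx) (y + sy) sx sy dx dy (t + 2 * dx - 2 * dy)
       else bwAltX n (x + sx) y sx sy dx dy (t - 2 * dy))

-- y-dominant loop of Source B: runs n times, error term u
def bwAltY (n : Nat) (x y sx sy dx dy u : Int) : List (Int × Int) :=
  match n with
  | 0 => []
  | n + 1 =>
    (x, y) ::
      (if u > 0 then bwAltY n (x + sx) (y + sy) sx sy dx dy (u - 2 * dy + 2 * dx)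
       else bwAltY n x (y + sy) sx sy dx dy (u + 2 * dx))

def bresenham_walk_alt (x0 : Int) (y0 : Int) (x1 : Int) (y1 : Int) : List (Int × Int) :=
  let dx := |x1 - x0|
  let dy := |y1 - y0|
  let sx : Int := if x0 < x1 then 1 else -1
  let sy : Int := if y0 < y1 then 1 else -1
  if dx ≥ dy then bwAltX (dx.toNat + 1) x0 y0 sx sy dx dy (dx - 2 * dy)
  else bwAltY (dy.toNat + 1) x0 y0 sx sy dx dy (2 * dx - dy)

-- ===== PRECONDITION & SPEC =====
def Spec_bresenham_walk (x0 : Int) (y0 : Int) (x1 : Int) (y1 : Int) (out : List (Int × Int)) : Prop := out = bresenham_walk_alt x0 y0 x1 y1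
instance (x0 : Int) (y0 : Int) (x1 : Int) (y1 : Int) (out : List (Int × Int)) : Decidable (Spec_bresenham_walk x0 y0 x1 y1 out) := by unfold Spec_bresenham_walk; infer_instance

-- ===== CLAIM (what is proved, stated in full; the proofs are below) =====
def Claim_equal_bresenham_walk : Prop := ∀ (x0 : Int) (y0 : Int) (x1 : Int) (y1 : Int), Dom_bresenham_walk x0 y0 x1 y1 → Spec_bresenham_walk x0 y0 x1 y1 (bresenham_walk x0 y0 x1 y1)

-- ===== LEMMAS AND PROOFS =====

-- x-dominant bisimulation: A's combined loop, started n+1 iterations from the end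
-- with error err, equals B's x-loop with t = 2*err - dx, under the standard invariants.
lemma loopX_eq (x1 y1 sx sy dx dy : Int)
    (hsx : sx = 1 ∨ sx = -1) (_hsy : sy = 1 ∨ sy = -1)
    (hdy : 0 ≤ dy) (hdd : dy ≤ dx) (hdx : 0 < dx) :
    ∀ (n : Nat), ∀ (f m : Nat) (x y err : Int),
      n < f →
      x1 = x + (n : Int) * sx → y1 = y + (m : Int) * sy →
      2 * err - dx = dx - 2 * dy + 2 * (n : Int) * dy - 2 * (m : Int) * dx →
      -(dx + dy) < 2 * err - dx → 2 * err - dx ≤ 2 * dx - 2 * dy →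
      bwLoop f x y x1 y1 sx sy dx dy err = bwAltX (n + 1) x y sx sy dx dy (2 * err - dx) := by
  intro n
  induction n with
  | zero =>
    intro f m x y err hf hx hy ht hlo hhi
    obtain ⟨f', rfl⟩ : ∃ f', f = f' + 1 := ⟨f - 1, by omega⟩
    have hm : m = 0 := by
      rcases m with _ | m'
      · rfl
      · exfalso
        have h1 : (1 : Int) ≤ ((m' + 1 : Nat) : Int) := by push_cast; omega
        have h2 : (1 : Int) * dx ≤ ((m' + 1 : Nat) : Int) * dx :=
          mul_le_mul_of_nonneg_right h1 (le_of_lt hdx)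
        push_cast at ht h2 ⊢
        nlinarith
    subst hm
    have hxx : x = x1 := by simp at hx; omega
    have hyy : y = y1 := by simp at hy; omega
    simp [bwLoop, bwAltX, hxx, hyy]
  | succ k ih =>
    intro f m x y err hf hx hy ht hlo hhi
    obtain ⟨f', rfl⟩ : ∃ f', f = f' + 1 := ⟨f - 1, by omega⟩
    have hne : ¬ (x = x1 ∧ y = y1) := by
      rintro ⟨h, -⟩
      rcases hsx with rfl | rfl <;> (rw [h] at hx; push_cast at hx; omega)
    have hcondX : 2 * err > -dy := by linarith
    by_cases hcondY : 2 * err < dx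
    · -- diagonal step: t < 0
      have htneg : 2 * err - dx < 0 := by linarith
      obtain ⟨m', rfl⟩ : ∃ m', m = m' + 1 := by
        rcases m with _ | m'
        · exfalso
          have hk : (0 : Int) ≤ (k : Int) * dy :=
            mul_nonneg (by positivity) hdy
          push_cast at ht
          nlinarith
        · exact ⟨m', rfl⟩
      have hrec := ih f' m' (x + sx) (y + sy) (err - dy + dx)
        (by omega)
        (by push_cast at hx ⊢; linarith [hx])
        (by push_cast at hy ⊢; linarith [hy])
        (by push_cast at ht ⊢; linarith [ht])
        (by linarith) (by linarith)
      show (x, y) :: _ = bwAltX (k + 1 + 1) x y sx sy dx dy (2 * err - dx)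
      rw [bwAltX]
      simp only [if_neg hne, if_pos hcondX, if_pos hcondY, if_pos htneg]
      rw [hrec]
      congr 2
      ring
    · -- horizontal step: t ≥ 0
      have htpos : ¬ (2 * err - dx < 0) := by omega
      have hlo' : -(dx + dy) < 2 * (err - dy) - dx := by
        have ht0 : dx ≤ 2 * err := by omega
        by_cases hdeq : dy = dx
        · subst hdeq
          have h2 : 2 * err - dy = (2 * (((k : Int) + 1) - (m : Int)) - 1) * dy := by
            push_cast at ht; linear_combination ht
          have h3 : (1 : Int) ≤ ((k : Int) + 1) - (m : Int) := by
            by_contra hc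
            have h4 : (2 * (((k : Int) + 1) - (m : Int)) - 1) ≤ -1 := by omega
            have h5 := mul_le_mul_of_nonneg_right h4 (le_of_lt hdx)
            linarith
          have h6 : (1 : Int) ≤ 2 * (((k : Int) + 1) - (m : Int)) - 1 := by omega
          have h7 := mul_le_mul_of_nonneg_right h6 (le_of_lt hdx)
          linarith
        · have hlt : dy < dx := lt_of_le_of_ne hdd hdeq
          omega
      have hrec := ih f' m (x + sx) y (err - dy)
        (by omega)
        (by push_cast at hx ⊢; linarith [hx])
        hy
        (by push_cast at ht ⊢; linarith [ht])
        hlo' (by omega)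
      show (x, y) :: _ = bwAltX (k + 1 + 1) x y sx sy dx dy (2 * err - dx)
      rw [bwAltX]
      simp only [if_neg hne, if_pos hcondX, if_neg hcondY, if_neg htpos]
      rw [hrec]
      congr 2
      ring

-- y-dominant bisimulation: u = 2*err + dy; n remaining y-steps, m remaining x-steps.
lemma loopY_eq (x1 y1 sx sy dx dy : Int)
    (_hsx : sx = 1 ∨ sx = -1) (hsy : sy = 1 ∨ sy = -1)
    (hdx : 0 ≤ dx) (hdd : dx < dy) :
    ∀ (n : Nat), ∀ (f m : Nat) (x y err : Int),
      n < f →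
      x1 = x + (m : Int) * sx → y1 = y + (n : Int) * sy →
      2 * err + dy = 2 * dx - dy - 2 * (n : Int) * dx + 2 * (m : Int) * dy →
      2 * dx - 2 * dy ≤ 2 * err + dy → 2 * err + dy < dx + dy →
      bwLoop f x y x1 y1 sx sy dx dy err = bwAltY (n + 1) x y sx sy dx dy (2 * err + dy) := by
  intro n
  induction n with
  | zero =>
    intro f m x y err hf hx hy ht hlo hhi
    obtain ⟨f', rfl⟩ : ∃ f', f = f' + 1 := ⟨f - 1, by omega⟩
    have hm : m = 0 := by
      rcases m with _ | m'
      · rfl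
      · exfalso
        have h1 : (1 : Int) ≤ ((m' + 1 : Nat) : Int) := by push_cast; omega
        have h2 : (1 : Int) * dy ≤ ((m' + 1 : Nat) : Int) * dy :=
          mul_le_mul_of_nonneg_right h1 (by linarith)
        push_cast at ht h2 ⊢
        nlinarith
    subst hm
    have hxx : x = x1 := by simp at hx; omega
    have hyy : y = y1 := by simp at hy; omega
    simp [bwLoop, bwAltY, hxx, hyy]
  | succ k ih =>
    intro f m x y err hf hx hy ht hlo hhi
    obtain ⟨f', rfl⟩ : ∃ f', f = f' + 1 := ⟨f - 1, by omega⟩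
    have hne : ¬ (x = x1 ∧ y = y1) := by
      rintro ⟨-, h⟩
      rcases hsy with rfl | rfl <;> (rw [h] at hy; push_cast at hy; omega)
    have hcondY : 2 * err < dx := by linarith
    by_cases hcondX : 2 * err > -dy
    · -- diagonal step: u > 0
      have hupos : 2 * err + dy > 0 := by linarith
      obtain ⟨m', rfl⟩ : ∃ m', m = m' + 1 := by
        rcases m with _ | m'
        · exfalso
          have hk : (0 : Int) ≤ (k : Int) * dx :=
            mul_nonneg (by positivity) hdx
          push_cast at ht
          nlinarith
        · exact ⟨m', rfl⟩
      have hrec := ih f' m' (x + sx) (y + sy) (err - dy + dx)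
        (by omega)
        (by push_cast at hx ⊢; linarith [hx])
        (by push_cast at hy ⊢; linarith [hy])
        (by push_cast at ht ⊢; linarith [ht])
        (by linarith) (by linarith)
      show (x, y) :: _ = bwAltY (k + 1 + 1) x y sx sy dx dy (2 * err + dy)
      rw [bwAltY]
      simp only [if_neg hne, if_pos hcondX, if_pos hcondY, if_pos hupos]
      rw [hrec]
      congr 2
      ring
    · -- vertical step: u ≤ 0
      have huneg : ¬ (2 * err + dy > 0) := by omega
      have hrec := ih f' m x (y + sy) (err + dx)
        (by omega)
        hx
        (by push_cast at hy ⊢; linarith [hy])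
        (by push_cast at ht ⊢; linarith [ht])
        (by omega) (by omega)
      show (x, y) :: _ = bwAltY (k + 1 + 1) x y sx sy dx dy (2 * err + dy)
      rw [bwAltY]
      simp only [if_neg hne, if_pos hcondY, if_neg hcondX, if_neg huneg]
      rw [hrec]
      congr 2
      ring

-- ===== VERDICT (by name: the statement is the Claim_ definition above) =====
theorem bresenham_walk_spec : Claim_equal_bresenham_walk := by
  intro x0 y0 x1 y1 _
  unfold Spec_bresenham_walk bresenham_walk bresenham_walk_alt
  set dx := |x1 - x0| with hdx
  set dy := |y1 - y0| with hdy
  set sx : Int := if x0 < x1 then 1 else -1 with hsx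
  set sy : Int := if y0 < y1 then 1 else -1 with hsy
  have hdx0 : 0 ≤ dx := abs_nonneg _
  have hdy0 : 0 ≤ dy := abs_nonneg _
  have hsx' : sx = 1 ∨ sx = -1 := by rw [hsx]; split <;> simp
  have hsy' : sy = 1 ∨ sy = -1 := by rw [hsy]; split <;> simp
  have hxeq : x1 = x0 + ((dx.toNat : Int)) * sx := by
    rw [Int.toNat_of_nonneg hdx0, hsx, hdx]
    rcases lt_trichotomy x0 x1 with h | h | h
    · rw [if_pos h, abs_of_pos (by linarith : (0:Int) < x1 - x0)]; ring
    · subst h; simp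
    · rw [if_neg (by linarith), abs_of_nonpos (by linarith : x1 - x0 ≤ 0)]; ring
  have hyeq : y1 = y0 + ((dy.toNat : Int)) * sy := by
    rw [Int.toNat_of_nonneg hdy0, hsy, hdy]
    rcases lt_trichotomy y0 y1 with h | h | h
    · rw [if_pos h, abs_of_pos (by linarith : (0:Int) < y1 - y0)]; ring
    · subst h; simp
    · rw [if_neg (by linarith), abs_of_nonpos (by linarith : y1 - y0 ≤ 0)]; ring
  have hdxc : ((dx.toNat : Int)) = dx := Int.toNat_of_nonneg hdx0
  have hdyc : ((dy.toNat : Int)) = dy := Int.toNat_of_nonneg hdy0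
  by_cases hcase : dx ≥ dy
  · rw [if_pos hcase]
    by_cases h0 : dx = 0
    · have hdy00 : dy = 0 := by omega
      have hx01 : x0 = x1 := by
        have := hxeq; rw [hdxc] at this; simp [h0] at this; omega
      have hy01 : y0 = y1 := by
        have := hyeq; rw [hdyc] at this; simp [hdy00] at this; omega
      simp [h0, hdy00, bwLoop, bwAltX, hx01, hy01]
    · have hdxpos : 0 < dx := by omega
      have := loopX_eq x1 y1 sx sy dx dy hsx' hsy' hdy0 hcase hdxpos
        dx.toNat ((dx + dy).toNat + 1) dy.toNat x0 y0 (dx - dy)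
        (by omega) hxeq hyeq
        (by rw [hdxc, hdyc]; ring)
        (by omega) (by omega)
      rw [this]
      congr 1
      ring
  · rw [if_neg hcase]
    have hddlt : dx < dy := by omega
    have := loopY_eq x1 y1 sx sy dx dy hsx' hsy' hdx0 hddlt
      dy.toNat ((dx + dy).toNat + 1) dx.toNat x0 y0 (dx - dy)
      (by omega) hxeq hyeq
      (by rw [hdxc, hdyc]; ring)
      (by omega) (by omega)
    rw [this]
    congr 1
    ring
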